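-- pv_equiv track=rewrite | github.com/kavya6170/Agentic-AI-based-HR-Compliance | rag_pipeline/graph_nodes.py | categorize_chunks
-- ===== SOURCE A (Python) =====
-- def categorize_chunks(chunks):
--     categories = {
--         "mandatory": [],
--         "restriction": [],
--         "penalty": [],
--         "procedure": [],
--         "general": []
--     }
--
--     for chunk in chunks:
--         text_lower = chunk["text"].lower()
--
--         if any(w in text_lower for w in ["must", "shall", "required", "mandatory"]):
--             categories["mandatory"].append(chunk)
--         if any(w in text_lower for w in ["not allowed", "prohibited", "restricted", "cannot"]):
--             categories["restriction"].append(chunk)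
--         if any(w in text_lower for w in ["disciplinary", "termination", "warning", "penalty"]):
--             categories["penalty"].append(chunk)
--         if any(w in text_lower for w in ["procedure", "process", "step"]):
--             categories["procedure"].append(chunk)
--
--         categories["general"].append(chunk)
--
--     return categories
-- ===== SOURCE B (Python) =====
-- def categorize_chunks(chunks):
--     chunks = list(chunks)
--
--     def bucket(words):
--         return [c for c in chunks if any(w in c["text"].lower() for w in words)]
--
--     return {
--         "mandatory": bucket(["must", "shall", "required", "mandatory"]),
--         "restriction": bucket(["not allowed", "prohibited", "restricted", "cannot"]),
--         "penalty": bucket(["disciplinary", "termination", "warning", "penalty"]),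
--         "procedure": bucket(["procedure", "process", "step"]),
--         "general": chunks,
--     }
-- ===== Notes on version B (the rewrite author's own statement) =====
-- stated objective: simpler
-- what changed: A builds all five buckets in one pass with per-chunk conditional appends; B builds each category with its own filter pass over the materialized chunk list (and 'general' is just the list itself).
import Mathlib
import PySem

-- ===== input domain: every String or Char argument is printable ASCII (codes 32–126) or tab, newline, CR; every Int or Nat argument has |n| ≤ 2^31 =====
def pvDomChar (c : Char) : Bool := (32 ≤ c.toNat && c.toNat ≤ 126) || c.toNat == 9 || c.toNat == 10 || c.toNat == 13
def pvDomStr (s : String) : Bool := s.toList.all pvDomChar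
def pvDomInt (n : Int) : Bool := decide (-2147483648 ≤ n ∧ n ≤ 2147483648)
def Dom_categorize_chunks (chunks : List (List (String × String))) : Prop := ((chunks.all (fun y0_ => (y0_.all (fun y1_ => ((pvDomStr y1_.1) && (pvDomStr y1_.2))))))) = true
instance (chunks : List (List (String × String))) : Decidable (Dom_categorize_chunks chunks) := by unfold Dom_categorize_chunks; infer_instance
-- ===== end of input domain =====

-- B rebuilds each category by its own filter pass over the chunk list instead of A's single
-- pass with per-chunk conditional appends into five buckets (objective: simpler).

-- ===== PORT A =====
-- chunk["text"] : first match in the association list (Python dict); Pre_ guarantees the key exists.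
def pvText (chunk : List (String × String)) : String :=
  (PySem.Dict.mk chunk).getD "text" ""

def pvHasAny (words : List String) (tl : String) : Bool :=
  words.any (fun w => PySem.Str.isIn w tl)

-- the dict's five fixed keys never change, so its state is carried as five bucket lists in order
def categorize_chunks (chunks : List (List (String × String))) : List (String × List (List (String × String))) :=
  let st := chunks.foldl
    (fun (st : List (List (String × String)) × List (List (String × String)) × List (List (String × String)) × List (List (String × String)) × List (List (String × String))) chunk =>
      let (m, r, p, pr, g) := st
      let tl := PySem.Str.lower (pvText chunk)
      let m := if pvHasAny ["must", "shall", "required", "mandatory"] tl then m ++ [chunk] else m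
      let r := if pvHasAny ["not allowed", "prohibited", "restricted", "cannot"] tl then r ++ [chunk] else r
      let p := if pvHasAny ["disciplinary", "termination", "warning", "penalty"] tl then p ++ [chunk] else p
      let pr := if pvHasAny ["procedure", "process", "step"] tl then pr ++ [chunk] else pr
      (m, r, p, pr, g ++ [chunk]))
    ([], [], [], [], [])
  [("mandatory", st.1), ("restriction", st.2.1), ("penalty", st.2.2.1),
   ("procedure", st.2.2.2.1), ("general", st.2.2.2.2)]

-- ===== PORT B =====
def pvBucket (chunks : List (List (String × String))) (words : List String) : List (List (String × String)) :=
  chunks.filter (fun c => words.any (fun w => PySem.Str.isIn w (PySem.Str.lower (pvText c))))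

def categorize_chunks_alt (chunks : List (List (String × String))) : List (String × List (List (String × String))) :=
  [("mandatory", pvBucket chunks ["must", "shall", "required", "mandatory"]),
   ("restriction", pvBucket chunks ["not allowed", "prohibited", "restricted", "cannot"]),
   ("penalty", pvBucket chunks ["disciplinary", "termination", "warning", "penalty"]),
   ("procedure", pvBucket chunks ["procedure", "process", "step"]),
   ("general", chunks)]

-- ===== PRECONDITION & SPEC =====
-- Pre_ excludes chunks without a "text" key, on which Python A (and B) raise KeyError.
def Pre_categorize_chunks (chunks : List (List (String × String))) : Prop :=
  (chunks.all (fun c => c.any (fun p => p.1 == "text"))) = true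
instance (chunks : List (List (String × String))) : Decidable (Pre_categorize_chunks chunks) := by
  unfold Pre_categorize_chunks; infer_instance

def pvWitness_categorize_chunks : (List (List (String × String))) :=
  [[("text", "You must follow the process")], [("text", "nothing here")]]

def Spec_categorize_chunks (chunks : List (List (String × String))) (out : List (String × List (List (String × String)))) : Prop := out = categorize_chunks_alt chunks
instance (chunks : List (List (String × String))) (out : List (String × List (List (String × String)))) : Decidable (Spec_categorize_chunks chunks out) := by unfold Spec_categorize_chunks; infer_instance

-- ===== CLAIM (what is proved, stated in full; the proofs are below) =====
def Claim_equal_categorize_chunks : Prop := ∀ (chunks : List (List (String × String))), Dom_categorize_chunks chunks → Pre_categorize_chunks chunks → Spec_categorize_chunks chunks (categorize_chunks chunks)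

-- ===== LEMMAS AND PROOFS =====
-- loop invariant: A's fold appends to each accumulator exactly the chunks B's filters select
theorem categorize_foldl_eq (cs : List (List (String × String)))
    (m r p pr g : List (List (String × String))) :
    cs.foldl
      (fun (st : List (List (String × String)) × List (List (String × String)) × List (List (String × String)) × List (List (String × String)) × List (List (String × String))) chunk =>
        let (m, r, p, pr, g) := st
        let tl := PySem.Str.lower (pvText chunk)
        let m := if pvHasAny ["must", "shall", "required", "mandatory"] tl then m ++ [chunk] else m
        let r := if pvHasAny ["not allowed", "prohibited", "restricted", "cannot"] tl then r ++ [chunk] else r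
        let p := if pvHasAny ["disciplinary", "termination", "warning", "penalty"] tl then p ++ [chunk] else p
        let pr := if pvHasAny ["procedure", "process", "step"] tl then pr ++ [chunk] else pr
        (m, r, p, pr, g ++ [chunk]))
      (m, r, p, pr, g)
    = (m ++ pvBucket cs ["must", "shall", "required", "mandatory"],
       r ++ pvBucket cs ["not allowed", "prohibited", "restricted", "cannot"],
       p ++ pvBucket cs ["disciplinary", "termination", "warning", "penalty"],
       pr ++ pvBucket cs ["procedure", "process", "step"],
       g ++ cs) := by
  induction cs generalizing m r p pr g with
  | nil => simp [pvBucket]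
  | cons c cs ih =>
      simp only [List.foldl_cons]
      rw [ih]
      simp only [pvBucket, List.filter_cons, pvHasAny]
      split_ifs <;> simp

theorem categorize_chunks_spec' (chunks : List (List (String × String))) :
    categorize_chunks chunks = categorize_chunks_alt chunks := by
  simp only [categorize_chunks, categorize_chunks_alt, categorize_foldl_eq, List.nil_append]

-- ===== VERDICT (by name: the statement is the Claim_ definition above) =====
theorem categorize_chunks_spec : Claim_equal_categorize_chunks := by
  intro chunks _ _
  exact categorize_chunks_spec' chunks
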